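-- pv_equiv track=rewrite | github.com/ArjanLig/prins-social-tracker | csv_import.py | _resolve_columns
-- ===== SOURCE A (Python) =====
-- COLUMN_MAP = {
--     "datum": ["Publicatietijdstip", "Datum", "Date", "Created", "Aangemaakt"],
--     "type": ["Berichttype", "Type", "Media type", "Post Type", "Content type"],
--     "tekst": ["Titel", "Bericht", "Caption", "Message", "Beschrijving", "Omschrijving", "Post Message"],
--     "bereik": ["Bereik", "Reach", "Lifetime Post Total Reach"],
--     "weergaven": ["Weergaven", "Impressions", "Views", "Lifetime Post Total Impressions"],
--     "likes": ["Reacties", "Likes", "Vind-ik-leuks", "Lifetime Post Like Reactions"],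
--     "reacties": ["Opmerkingen", "Comments", "Lifetime Post Comments"],
--     "shares": ["Deelacties", "Shares", "Lifetime Post Shares"],
--     "klikken": ["Totaal aantal klikken", "Clicks", "Link Clicks",
--                 "Lifetime Post Total Clicks"],
-- }
--
-- def _resolve_columns(header: list[str]) -> dict[str, str | None]:
--     """Match CSV-kolomnamen naar interne veldnamen."""
--     mapping = {}
--     for field, candidates in COLUMN_MAP.items():
--         mapping[field] = None
--         for candidate in candidates:
--             for h in header:
--                 if h.strip().lower() == candidate.lower():
--                     mapping[field] = h
--                     break
--             if mapping[field]:
--                 break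
--     return mapping
-- ===== SOURCE B (Python) =====
-- COLUMN_MAP = {
--     "datum": ["Publicatietijdstip", "Datum", "Date", "Created", "Aangemaakt"],
--     "type": ["Berichttype", "Type", "Media type", "Post Type", "Content type"],
--     "tekst": ["Titel", "Bericht", "Caption", "Message", "Beschrijving", "Omschrijving", "Post Message"],
--     "bereik": ["Bereik", "Reach", "Lifetime Post Total Reach"],
--     "weergaven": ["Weergaven", "Impressions", "Views", "Lifetime Post Total Impressions"],
--     "likes": ["Reacties", "Likes", "Vind-ik-leuks", "Lifetime Post Like Reactions"],
--     "reacties": ["Opmerkingen", "Comments", "Lifetime Post Comments"],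
--     "shares": ["Deelacties", "Shares", "Lifetime Post Shares"],
--     "klikken": ["Totaal aantal klikken", "Clicks", "Link Clicks",
--                 "Lifetime Post Total Clicks"],
-- }
--
--
-- def _resolve_columns(header: list[str]) -> dict[str, str | None]:
--     """Match CSV-kolomnamen naar interne veldnamen."""
--     # Single pass over the header, keeping per field the best-priority match
--     # seen so far (priority = position in the field's candidate list;
--     # earlier headers win ties because the update is strict).
--     best = {}  # field -> (priority, original header)
--     for h in header:
--         key = h.strip().lower()
--         for field, candidates in COLUMN_MAP.items():
--             lows = [c.lower() for c in candidates]
--             if key in lows: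
--                 i = lows.index(key)
--                 cur = best.get(field)
--                 if cur is None or i < cur[0]:
--                     best[field] = (i, h)
--     return {field: (best[field][1] if field in best else None)
--             for field in COLUMN_MAP}
-- ===== Notes on version B (the rewrite author's own statement) =====
-- stated objective: alternative
-- what changed: B inverts the loop nesting: instead of A's per-field candidate loops each rescanning the header and breaking at the first hit, B makes a single pass over the header, computing each header's priority (its position in a field's candidate list) and keeping per field the strictly-best (priority, header) pair seen so far, earlier headers winning ties.
import Mathlib
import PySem

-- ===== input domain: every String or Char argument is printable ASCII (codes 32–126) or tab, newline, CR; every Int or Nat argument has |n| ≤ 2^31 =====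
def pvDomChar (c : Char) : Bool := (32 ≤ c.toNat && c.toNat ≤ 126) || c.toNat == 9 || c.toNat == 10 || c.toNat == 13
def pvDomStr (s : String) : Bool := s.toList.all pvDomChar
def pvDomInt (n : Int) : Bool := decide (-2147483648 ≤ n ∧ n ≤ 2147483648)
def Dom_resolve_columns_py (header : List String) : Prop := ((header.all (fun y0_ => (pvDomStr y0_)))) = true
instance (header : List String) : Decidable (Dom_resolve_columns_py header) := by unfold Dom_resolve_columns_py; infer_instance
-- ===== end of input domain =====

-- B inverts A's loop nesting: one pass over the header keeping per field the
-- best-priority match seen so far, instead of per-field rescans of the header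
-- (objective: alternative).

-- COLUMN_MAP from the module, in insertion order
def pvCOLUMN_MAP : List (String × List String) :=
  [("datum", ["Publicatietijdstip", "Datum", "Date", "Created", "Aangemaakt"]),
   ("type", ["Berichttype", "Type", "Media type", "Post Type", "Content type"]),
   ("tekst", ["Titel", "Bericht", "Caption", "Message", "Beschrijving", "Omschrijving", "Post Message"]),
   ("bereik", ["Bereik", "Reach", "Lifetime Post Total Reach"]),
   ("weergaven", ["Weergaven", "Impressions", "Views", "Lifetime Post Total Impressions"]),
   ("likes", ["Reacties", "Likes", "Vind-ik-leuks", "Lifetime Post Like Reactions"]),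
   ("reacties", ["Opmerkingen", "Comments", "Lifetime Post Comments"]),
   ("shares", ["Deelacties", "Shares", "Lifetime Post Shares"]),
   ("klikken", ["Totaal aantal klikken", "Clicks", "Link Clicks", "Lifetime Post Total Clicks"])]

-- ===== PORT A =====
-- h.strip().lower()
def pvNorm (h : String) : String := PySem.Str.lower (PySem.Str.strip h)

-- A's inner loop: first h in header with h.strip().lower() == cl (breaks on the first hit)
def pvFindH (cl : String) : List String → Option String
  | [] => none
  | h :: rest => if pvNorm h = cl then some h else pvFindH cl rest

-- Python truthiness of an Optional[str]
def pvTruthy : Option String → Bool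
  | some s => s != ""
  | none => false

-- A's candidate loop for one field: updates mapping[field], breaks when mapping[field] is truthy
def pvFieldLoopA (header : List String) (field : String)
    (mapping : PySem.Dict String (Option String)) :
    List String → PySem.Dict String (Option String)
  | [] => mapping
  | c :: rest =>
      let mapping' :=
        match pvFindH (PySem.Str.lower c) header with
        | some h => mapping.insert field (some h)
        | none => mapping
      if pvTruthy (mapping'.getD field none) then mapping'
      else pvFieldLoopA header field mapping' rest

def resolve_columns_py (header : List String) : List (String × Option String) :=
  (pvCOLUMN_MAP.foldl
    (fun m fc => pvFieldLoopA header fc.1 (m.insert fc.1 none) fc.2)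
    PySem.Dict.empty).items

-- ===== PORT B =====
-- body of B's inner 'for field, candidates in COLUMN_MAP.items()' loop, for one pair
def pvUpdB (key h : String) (b : PySem.Dict String (Nat × String))
    (fc : String × List String) : PySem.Dict String (Nat × String) :=
  match PySem.List.index? (fc.2.map PySem.Str.lower) key with
  | none => b
  | some i =>
      match b.get? fc.1 with
      | none => b.insert fc.1 (i, h)
      | some cur => if i < cur.1 then b.insert fc.1 (i, h) else b

-- one iteration of B's 'for h in header' pass
def pvStepB (b : PySem.Dict String (Nat × String)) (h : String) :
    PySem.Dict String (Nat × String) :=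
  pvCOLUMN_MAP.foldl (pvUpdB (pvNorm h) h) b

def resolve_columns_py_alt (header : List String) : List (String × Option String) :=
  let best := header.foldl pvStepB PySem.Dict.empty
  pvCOLUMN_MAP.map (fun fc => (fc.1, (best.get? fc.1).map (·.2)))

-- ===== PRECONDITION & SPEC =====
def Spec_resolve_columns_py (header : List String) (out : List (String × Option String)) : Prop := out = resolve_columns_py_alt header
instance (header : List String) (out : List (String × Option String)) : Decidable (Spec_resolve_columns_py header out) := by unfold Spec_resolve_columns_py; infer_instance

-- ===== CLAIM =====
def Claim_equal_resolve_columns_py : Prop := ∀ (header : List String), Dom_resolve_columns_py header → Spec_resolve_columns_py header (resolve_columns_py header)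

-- ===== LEMMAS AND PROOFS =====

-- common specification per field: first candidate with a matching header, first such header
def pvSpecF (header : List String) : List String → Option String
  | [] => none
  | c :: rest =>
      match pvFindH (PySem.Str.lower c) header with
      | some h => some h
      | none => pvSpecF header rest

-- ----- A side -----
theorem findH_ne_empty (cl : String) (hcl : cl ≠ "") :
    ∀ (hs : List String) (h : String), pvFindH cl hs = some h → h ≠ "" := by
  intro hs
  induction hs with
  | nil => intro h hh; simp [pvFindH] at hh
  | cons x xs ih =>
      intro h hh
      simp only [pvFindH] at hh
      split at hh
      · rename_i hx
        cases hh
        intro he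
        subst he
        exact hcl (hx ▸ rfl)
      · exact ih h hh

theorem fieldLoopA_eq (header : List String) (field : String)
    (m : PySem.Dict String (Option String)) (cands : List String)
    (hc : ∀ c ∈ cands, PySem.Str.lower c ≠ "") :
    pvFieldLoopA header field (m.insert field none) cands
      = m.insert field (pvSpecF header cands) := by
  induction cands generalizing m with
  | nil => simp [pvFieldLoopA, pvSpecF]
  | cons c rest ih =>
      simp only [pvFieldLoopA, pvSpecF]
      cases hf : pvFindH (PySem.Str.lower c) header with
      | some h =>
          have hne : h ≠ "" :=
            findH_ne_empty _ (hc c (by simp)) header h hf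
          simp only [PySem.Dict.insert_insert_self, PySem.Dict.getD_insert_self]
          simp [pvTruthy, hne]
      | none =>
          simp only [PySem.Dict.getD_insert_self, pvTruthy, Bool.false_eq_true, if_false]
          exact ih m (fun c' hc' => hc c' (by simp [hc']))

-- ----- B side -----
-- the per-field projection of one pvUpdB step
def pvStepF (cs : List String) (o : Option (Nat × String)) (h : String) :
    Option (Nat × String) :=
  match PySem.List.index? (cs.map PySem.Str.lower) (pvNorm h) with
  | none => o
  | some i =>
      match o with
      | none => some (i, h)
      | some cur => if i < cur.1 then some (i, h) else o

theorem get?_updB_ne (key h f' : String) (b : PySem.Dict String (Nat × String))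
    (fc : String × List String) (hne : f' ≠ fc.1) :
    (pvUpdB key h b fc).get? f' = b.get? f' := by
  unfold pvUpdB
  split
  · rfl
  · split
    · simp [PySem.Dict.get?_insert, hne]
    · split
      · simp [PySem.Dict.get?_insert, hne]
      · rfl

theorem get?_updB_self (h f : String) (cs : List String)
    (b : PySem.Dict String (Nat × String)) :
    (pvUpdB (pvNorm h) h b (f, cs)).get? f = pvStepF cs (b.get? f) h := by
  unfold pvUpdB pvStepF
  cases hi : PySem.List.index? (cs.map PySem.Str.lower) (pvNorm h) with
  | none => rfl
  | some i =>
      cases hg : b.get? f with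
      | none => simp [PySem.Dict.get?_insert_self]
      | some cur =>
          by_cases hlt : i < cur.1
          · simp [hlt, PySem.Dict.get?_insert_self]
          · simp [hlt, hg]

theorem get?_stepB (b : PySem.Dict String (Nat × String)) (h : String)
    (field : String) (cs : List String) (hmem : (field, cs) ∈ pvCOLUMN_MAP) :
    (pvStepB b h).get? field = pvStepF cs (b.get? field) h := by
  unfold pvStepB pvCOLUMN_MAP
  simp only [pvCOLUMN_MAP] at hmem
  simp only [List.mem_cons, List.not_mem_nil, or_false, Prod.mk.injEq] at hmem
  simp only [List.foldl_cons, List.foldl_nil]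
  rcases hmem with ⟨hf, hc⟩ | ⟨hf, hc⟩ | ⟨hf, hc⟩ | ⟨hf, hc⟩ | ⟨hf, hc⟩ | ⟨hf, hc⟩ | ⟨hf, hc⟩ | ⟨hf, hc⟩ | ⟨hf, hc⟩ <;>
    subst hf <;> subst hc
  all_goals
    repeat rw [get?_updB_ne _ _ _ _ _ (by decide)]
  all_goals rw [get?_updB_self]
  all_goals
    repeat rw [get?_updB_ne _ _ _ _ _ (by decide)]

theorem get?_foldl_stepB (header : List String) (b : PySem.Dict String (Nat × String))
    (field : String) (cs : List String) (hmem : (field, cs) ∈ pvCOLUMN_MAP) :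
    (header.foldl pvStepB b).get? field = header.foldl (pvStepF cs) (b.get? field) := by
  induction header generalizing b with
  | nil => rfl
  | cons h t ih =>
      simp only [List.foldl_cons]
      rw [ih (pvStepB b h), get?_stepB b h field cs hmem]

-- combine two best-so-far results (left = earlier, wins ties)
def pvComb : Option (Nat × String) → Option (Nat × String) → Option (Nat × String)
  | none, q => q
  | o, none => o
  | some (p, h), some (p', h') => if p' < p then some (p', h') else some (p, h)

theorem stepF_eq_comb (cs : List String) (o : Option (Nat × String)) (h : String) :
    pvStepF cs o h
      = pvComb o ((PySem.List.index? (cs.map PySem.Str.lower) (pvNorm h)).map (fun i => (i, h))) := by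
  unfold pvStepF pvComb
  cases PySem.List.index? (cs.map PySem.Str.lower) (pvNorm h) with
  | none => cases o with | none => rfl | some cur => rfl
  | some i =>
      cases o with
      | none => rfl
      | some cur => rcases cur with ⟨p, hh⟩; by_cases hlt : i < p <;> simp [hlt]

theorem comb_none_left (q : Option (Nat × String)) : pvComb none q = q := by
  cases q <;> rfl

theorem comb_none_right (q : Option (Nat × String)) : pvComb q none = q := by
  cases q <;> rfl

theorem comb_assoc (a b c : Option (Nat × String)) :
    pvComb (pvComb a b) c = pvComb a (pvComb b c) := by
  rcases a with _ | ⟨p1, h1⟩ <;> rcases b with _ | ⟨p2, h2⟩ <;> rcases c with _ | ⟨p3, h3⟩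
  all_goals try rfl
  all_goals try (rw [comb_none_right, comb_none_right])
  by_cases h12 : p2 < p1 <;> by_cases h13 : p3 < p1 <;> by_cases h23 : p3 < p2 <;>
    simp [pvComb, h12, h13, h23] <;> omega

-- B's single-field fold = combine of the per-header singletons
def pvM (cs : List String) (hs : List String) : Option (Nat × String) :=
  hs.foldl (fun q h => pvComb q ((PySem.List.index? (cs.map PySem.Str.lower) (pvNorm h)).map (fun i => (i, h)))) none

theorem foldl_comb_out (cs : List String) (hs : List String) (o : Option (Nat × String)) :
    hs.foldl (fun q h => pvComb q ((PySem.List.index? (cs.map PySem.Str.lower) (pvNorm h)).map (fun i => (i, h)))) o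
      = pvComb o (pvM cs hs) := by
  induction hs generalizing o with
  | nil => cases o <;> rfl
  | cons h t ih =>
      simp only [List.foldl_cons, pvM]
      rw [ih, ih (pvComb none _), comb_assoc, comb_none_left]

theorem foldl_stepF_eq_M (cs : List String) (hs : List String) :
    hs.foldl (pvStepF cs) none = pvM cs hs := by
  exact PySem.List.foldl_congr_mem hs _ _ none (fun acc x _ => stepF_eq_comb cs acc x)

theorem M_cons_header (cs : List String) (h : String) (t : List String) :
    pvM cs (h :: t)
      = pvComb ((PySem.List.index? (cs.map PySem.Str.lower) (pvNorm h)).map (fun i => (i, h))) (pvM cs t) := by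
  show (t.foldl _ (pvComb none _)) = _
  rw [foldl_comb_out, comb_none_left]

theorem M_cons (c : String) (rest : List String) (hs : List String) :
    pvM (c :: rest) hs
      = match pvFindH (PySem.Str.lower c) hs with
        | some h => some (0, h)
        | none => (pvM rest hs).map (fun p => (p.1 + 1, p.2)) := by
  induction hs with
  | nil => simp [pvM, pvFindH]
  | cons h t ih =>
      by_cases hkey : pvNorm h = PySem.Str.lower c
      · have hidx : PySem.List.index? (PySem.Str.lower c :: rest.map PySem.Str.lower) (pvNorm h) = some 0 := by
          rw [hkey, PySem.List.index?_cons_self]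
        have hfh : pvFindH (PySem.Str.lower c) (h :: t) = some h := by
          simp [pvFindH, hkey]
        rw [M_cons_header]
        simp only [List.map_cons]
        rw [hidx, hfh]
        cases pvM (c :: rest) t with
        | none => rfl
        | some q => simp [pvComb, Option.map_some]
      · have hfh : pvFindH (PySem.Str.lower c) (h :: t) = pvFindH (PySem.Str.lower c) t := by
          simp [pvFindH, hkey]
        rw [M_cons_header, ih, hfh]
        simp only [List.map_cons]
        rw [PySem.List.index?_cons_of_ne (rest.map PySem.Str.lower) (fun he => hkey he.symm)]
        cases hft : pvFindH (PySem.Str.lower c) t with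
        | some h' =>
            cases PySem.List.index? (rest.map PySem.Str.lower) (pvNorm h) with
            | none => rfl
            | some i => simp [pvComb]
        | none =>
            rw [M_cons_header (cs := rest)]
            cases PySem.List.index? (rest.map PySem.Str.lower) (pvNorm h) with
            | none => simp only [Option.map_none, comb_none_left]
            | some i =>
                cases pvM rest t with
                | none => simp [pvComb]
                | some q =>
                    rcases q with ⟨p, hh⟩
                    by_cases hpi : p < i <;>
                      simp [pvComb, hpi]

theorem M_spec (cs : List String) (hs : List String) :
    (pvM cs hs).map (·.2) = pvSpecF hs cs := by
  induction cs with
  | nil =>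
      have : pvM [] hs = none := by
        induction hs with
        | nil => rfl
        | cons h t ih =>
            have hnone : PySem.List.index? (([] : List String).map PySem.Str.lower) (pvNorm h) = none := by
              rw [PySem.List.index?_eq_none_iff]; simp
            simp only [pvM, List.foldl_cons, hnone, Option.map_none, pvComb] at *
            exact ih
      simp [this, pvSpecF]
  | cons c rest ih =>
      rw [M_cons]
      cases hf : pvFindH (PySem.Str.lower c) hs with
      | some h => simp [pvSpecF, hf]
      | none =>
          simp only [pvSpecF, hf]
          rw [← ih]
          cases pvM rest hs <;> simp

-- ===== VERDICT =====
theorem resolve_columns_py_spec : Claim_equal_resolve_columns_py := by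
  intro header _
  unfold Spec_resolve_columns_py resolve_columns_py resolve_columns_py_alt
  have hfield : ∀ (field : String) (cs : List String), (field, cs) ∈ pvCOLUMN_MAP →
      ((header.foldl pvStepB PySem.Dict.empty).get? field).map (·.2) = pvSpecF header cs := by
    intro field cs hmem
    rw [get?_foldl_stepB header _ field cs hmem, PySem.Dict.get?_empty,
        foldl_stepF_eq_M, M_spec]
  simp only [pvCOLUMN_MAP, List.foldl_cons, List.foldl_nil, List.map_cons, List.map_nil]
  rw [fieldLoopA_eq _ _ _ _ (by decide), fieldLoopA_eq _ _ _ _ (by decide),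
      fieldLoopA_eq _ _ _ _ (by decide), fieldLoopA_eq _ _ _ _ (by decide),
      fieldLoopA_eq _ _ _ _ (by decide), fieldLoopA_eq _ _ _ _ (by decide),
      fieldLoopA_eq _ _ _ _ (by decide), fieldLoopA_eq _ _ _ _ (by decide),
      fieldLoopA_eq _ _ _ _ (by decide)]
  rw [hfield "datum" ["Publicatietijdstip", "Datum", "Date", "Created", "Aangemaakt"] (by simp [pvCOLUMN_MAP])]
  rw [hfield "type" ["Berichttype", "Type", "Media type", "Post Type", "Content type"] (by simp [pvCOLUMN_MAP])]
  rw [hfield "tekst" ["Titel", "Bericht", "Caption", "Message", "Beschrijving", "Omschrijving", "Post Message"] (by simp [pvCOLUMN_MAP])]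
  rw [hfield "bereik" ["Bereik", "Reach", "Lifetime Post Total Reach"] (by simp [pvCOLUMN_MAP])]
  rw [hfield "weergaven" ["Weergaven", "Impressions", "Views", "Lifetime Post Total Impressions"] (by simp [pvCOLUMN_MAP])]
  rw [hfield "likes" ["Reacties", "Likes", "Vind-ik-leuks", "Lifetime Post Like Reactions"] (by simp [pvCOLUMN_MAP])]
  rw [hfield "reacties" ["Opmerkingen", "Comments", "Lifetime Post Comments"] (by simp [pvCOLUMN_MAP])]
  rw [hfield "shares" ["Deelacties", "Shares", "Lifetime Post Shares"] (by simp [pvCOLUMN_MAP])]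
  rw [hfield "klikken" ["Totaal aantal klikken", "Clicks", "Link Clicks", "Lifetime Post Total Clicks"] (by simp [pvCOLUMN_MAP])]
  simp [PySem.Dict.items_insert_of_not_contains, PySem.Dict.contains_insert,
        PySem.Dict.empty]
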